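-- pv_equiv track=rewrite | github.com/Miguelon-Martinez/Background-Field-Gauge-in-Feynmaster | Background_Field_Gauge/Quartic Ghost Vertex/Nucleus/ControlExtract.py | mynestco
-- ===== SOURCE A (Python) =====
-- def mynestco(stri):
-- 	coin=0;	y0=[]
-- 	for i in range(len(stri)):
-- 		if "".join(stri[i:i+2]) == '(*':
-- 			coin+=1
-- 		elif "".join(stri[i:i+2]) == '*)':
-- 			coin = coin - 1
-- 		y0.append(str(coin))
-- 	return y0
-- ===== SOURCE B (Python) =====
-- def mynestco(stri):
--     # Event/run-length algorithm: locate the comment delimiters with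
--     # str.find, merge the events by position, then emit the answer as
--     # constant-depth runs -- no per-character scan.
--     n = len(stri)
--     events = []
--     for pat, d in (('(*', 1), ('*)', -1)):
--         p = stri.find(pat)
--         while p != -1:
--             events.append((p, d))
--             p = stri.find(pat, p + 1)
--     events.sort(key=lambda e: e[0])
--     out = []
--     depth = 0
--     prev = 0
--     for pos, d in events:
--         out.extend([str(depth)] * (pos - prev))
--         depth += d
--         out.append(str(depth))
--         prev = pos + 1
--     out.extend([str(depth)] * (n - prev))
--     return out
-- ===== Notes on version B (the rewrite author's own statement) =====
-- stated objective: faster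
-- what changed: Replaces A's per-character counter scan by an event/run-length algorithm: every comment-open/comment-close digraph is located with str.find, the events are merged by position, and the output is emitted as constant-depth runs between events.
import Mathlib
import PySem

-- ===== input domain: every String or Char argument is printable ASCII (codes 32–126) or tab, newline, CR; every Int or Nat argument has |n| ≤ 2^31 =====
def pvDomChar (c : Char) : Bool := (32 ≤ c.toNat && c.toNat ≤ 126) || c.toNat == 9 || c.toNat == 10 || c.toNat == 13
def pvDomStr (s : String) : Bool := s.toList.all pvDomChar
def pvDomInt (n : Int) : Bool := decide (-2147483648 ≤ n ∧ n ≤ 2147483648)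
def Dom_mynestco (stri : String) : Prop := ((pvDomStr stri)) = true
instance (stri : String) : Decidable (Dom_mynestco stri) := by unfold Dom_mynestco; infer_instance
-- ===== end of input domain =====

-- B replaces A's per-character counter scan by an event/run-length algorithm: find every
-- comment-open/comment-close digraph with str.find, merge the events by position, and emit
-- the output as constant-depth runs (measured faster in a timing run; constant factor).

-- ===== PORT A =====
-- loop body of A: slice stri[i:i+2], bump/drop the counter, append str(coin)
def pvStepA (l : List Char) (st : Int × List String) (i : Int) : Int × List String :=
  let coin :=
    if PySem.List.slice l (some i) (some (i + 2)) = ['(', '*'] then st.1 + 1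
    else if PySem.List.slice l (some i) (some (i + 2)) = ['*', ')'] then st.1 - 1
    else st.1
  (coin, st.2 ++ [PySem.Int.toStr coin])

def mynestco (stri : String) : List String :=
  let l := stri.toList
  ((PySem.List.pyRange 0 (l.length : Int) 1).foldl (pvStepA l) ((0 : Int), ([] : List String))).2

-- ===== PORT B =====
-- termination fact for the 'p = stri.find(pat, p+1)' while loop: a hit lies in [start, len)
lemma pvFind_past (l pat : List Char) (k : Nat) (hk : l.length < k) :
    PySem.Chars.findFrom l pat (k : Int) none = -1 := by
  unfold PySem.Chars.findFrom
  have h0 : ¬((k : Int) < 0) := by omega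
  simp [h0]
  intro hle
  exact absurd hle (by omega)

lemma pvFind_bounds (l : List Char) (c1 c2 : Char) (start : Nat)
    (h : PySem.Chars.findFrom l [c1, c2] (start : Int) none ≠ -1) :
    start ≤ (PySem.Chars.findFrom l [c1, c2] (start : Int) none).toNat ∧
    (PySem.Chars.findFrom l [c1, c2] (start : Int) none).toNat < l.length := by
  by_cases hk : start ≤ l.length
  · obtain ⟨h1, h2, _⟩ := PySem.Chars.findFrom_natCast_spec l [c1, c2] start hk h
    have hlen : ([c1, c2] : List Char).length ≤
        (l.drop (PySem.Chars.findFrom l [c1, c2] (start : Int) none).toNat).length :=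
      h2.length_le
    simp at hlen
    constructor
    · omega
    · omega
  · exact absurd (pvFind_past l [c1, c2] start (by omega)) h

-- 'while p != -1: events.append((p, d)); p = stri.find(pat, p + 1)'
def pvCollect (l : List Char) (c1 c2 : Char) (d : Int) (start : Nat) : List (Nat × Int) :=
  if h : PySem.Chars.findFrom l [c1, c2] (start : Int) none = -1 then []
  else ((PySem.Chars.findFrom l [c1, c2] (start : Int) none).toNat, d) ::
    pvCollect l c1 c2 d ((PySem.Chars.findFrom l [c1, c2] (start : Int) none).toNat + 1)
termination_by l.length + 1 - start
decreasing_by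
  have := pvFind_bounds l c1 c2 start h
  omega

-- 'for pos, d in events: fill the constant run, append the new depth' then the tail run
def pvEmit (n : Nat) : List (Nat × Int) → Int → Nat → List String → List String
  | [], depth, prev, out => out ++ List.replicate (n - prev) (PySem.Int.toStr depth)
  | (pos, d) :: rest, depth, prev, out =>
      pvEmit n rest (depth + d) (pos + 1)
        (out ++ List.replicate (pos - prev) (PySem.Int.toStr depth) ++ [PySem.Int.toStr (depth + d)])

def mynestco_alt (stri : String) : List String :=
  let l := stri.toList
  let events := PySem.List.sorted
    (pvCollect l '(' '*' 1 0 ++ pvCollect l '*' ')' (-1) 0) (fun e => e.1) false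
  pvEmit l.length events 0 0 []

-- ===== PRECONDITION & SPEC =====
def Spec_mynestco (stri : String) (out : List String) : Prop := out = mynestco_alt stri
instance (stri : String) (out : List String) : Decidable (Spec_mynestco stri out) := by unfold Spec_mynestco; infer_instance

-- ===== CLAIM (what is proved, stated in full; the proofs are below) =====
def Claim_equal_mynestco : Prop := ∀ (stri : String), Dom_mynestco stri → Spec_mynestco stri (mynestco stri)

-- ===== LEMMAS AND PROOFS =====

-- nesting delta contributed by position i
def pvDelta (l : List Char) (i : Nat) : Int :=
  if (l.drop i).take 2 = ['(', '*'] then 1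
  else if (l.drop i).take 2 = ['*', ')'] then -1
  else 0

-- running prefix sums of a delta list
def pvAccum (acc : Int) : List Int → List Int
  | [] => []
  | d :: ds => (acc + d) :: pvAccum (acc + d) ds

-- positions ≥ s where the two-char pattern matches
def pvPos (l pat : List Char) (s : Nat) : List Nat :=
  if _h : s < l.length then
    (if (l.drop s).take 2 = pat then [s] else []) ++ pvPos l pat (s + 1)
  else []
termination_by l.length - s

-- the merged event list: positions ≥ e with nonzero delta, in order
def pvEv (l : List Char) (e : Nat) : List (Nat × Int) :=
  if _h : e < l.length then
    (if pvDelta l e = 0 then [] else [(e, pvDelta l e)]) ++ pvEv l (e + 1)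
  else []
termination_by l.length - e

lemma pvPos_unfold (l pat : List Char) (s : Nat) :
    pvPos l pat s = if s < l.length then
      ((if (l.drop s).take 2 = pat then [s] else []) ++ pvPos l pat (s + 1)) else [] := by
  rw [pvPos]
  split_ifs <;> rfl

lemma pvEv_unfold (l : List Char) (e : Nat) :
    pvEv l e = if e < l.length then
      ((if pvDelta l e = 0 then [] else [(e, pvDelta l e)]) ++ pvEv l (e + 1)) else [] := by
  rw [pvEv]
  split_ifs <;> rfl

-- ---- A-side: the loop is pvAccum of the deltas ----
lemma pvStepA_eq_delta (l : List Char) (st : Int × List String) (a : Nat) :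
    pvStepA l st (a : Int) = (st.1 + pvDelta l a, st.2 ++ [PySem.Int.toStr (st.1 + pvDelta l a)]) := by
  have h2 : ((a : Int) + 2) = ((a : Int) + ((2 : Nat) : Int)) := by norm_num
  unfold pvStepA pvDelta
  rw [h2, PySem.List.slice_natCast_add]
  split_ifs <;> simp [sub_eq_add_neg]

lemma loopA (l : List Char) : ∀ (k a : Nat) (coin : Int) (ys : List String),
    l.length = a + k →
    ((PySem.List.pyRange (a : Int) (l.length : Int) 1).foldl (pvStepA l) (coin, ys)).2
      = ys ++ (pvAccum coin (((List.range l.length).map (pvDelta l)).drop a)).map PySem.Int.toStr := by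
  intro k
  induction k with
  | zero =>
    intro a coin ys h
    rw [PySem.List.pyRange_one_eq_nil (by exact_mod_cast (show l.length ≤ a by omega))]
    simp [List.drop_eq_nil_of_le, h, pvAccum]
  | succ k ih =>
    intro a coin ys h
    have ha : a < l.length := by omega
    have hlt : (a : Int) < (l.length : Int) := by exact_mod_cast ha
    rw [PySem.List.pyRange_one_cons hlt, List.foldl_cons, pvStepA_eq_delta]
    have hcast : ((a : Int) + 1) = (((a + 1 : Nat)) : Int) := by push_cast; ring
    rw [hcast, ih (a + 1) (coin + pvDelta l a) _ (by omega)]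
    have hdrop : ((List.range l.length).map (pvDelta l)).drop a
        = pvDelta l a :: ((List.range l.length).map (pvDelta l)).drop (a + 1) := by
      rw [List.drop_eq_getElem_cons (by simpa using ha)]
      simp
    rw [hdrop]
    simp [pvAccum]

-- ---- B-side step 1: pvCollect is the match-position list ----
lemma pvPos_eq_nil_of_ge (l pat : List Char) (s : Nat) (h : l.length ≤ s) :
    pvPos l pat s = [] := by
  unfold pvPos
  rw [dif_neg (by omega)]

lemma pvPos_eq_nil (l pat : List Char) : ∀ (k s : Nat), l.length ≤ s + k →
    (∀ j, s ≤ j → (l.drop j).take 2 ≠ pat) → pvPos l pat s = [] := by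
  intro k
  induction k with
  | zero => intro s h _; exact pvPos_eq_nil_of_ge l pat s (by omega)
  | succ k ih =>
    intro s h hm
    by_cases hs : s < l.length
    · unfold pvPos
      rw [dif_pos hs, if_neg (hm s le_rfl)]
      simpa using ih (s + 1) (by omega) (fun j hj => hm j (by omega))
    · exact pvPos_eq_nil_of_ge l pat s (by omega)

lemma pvPos_skip (l pat : List Char) : ∀ (k s : Nat), (∀ j, s ≤ j → j < s + k → (l.drop j).take 2 ≠ pat) →
    pvPos l pat s = pvPos l pat (s + k) := by
  intro k
  induction k with
  | zero => intro s _; rfl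
  | succ k ih =>
    intro s hm
    by_cases hs : s < l.length
    · conv_lhs => rw [pvPos_unfold]
      rw [if_pos hs, if_neg (hm s le_rfl (by omega))]
      have h2 := ih (s + 1) (fun j h1 h2 => hm j (by omega) (by omega))
      have h3 : s + 1 + k = s + (k + 1) := by omega
      rw [h3] at h2
      rw [List.nil_append]
      exact h2
    · rw [pvPos_eq_nil_of_ge l pat s (by omega), pvPos_eq_nil_of_ge l pat (s + (k + 1)) (by omega)]

-- a prefix of a drop is an infix
lemma pvPrefix_drop_infix (pat l : List Char) (m : Nat) (h : pat <+: l.drop m) :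
    pat <:+: l :=
  h.isInfix.trans (l.drop_suffix m).isInfix

lemma pvCollect_eq (l : List Char) (c1 c2 : Char) (d : Int) : ∀ (k s : Nat), l.length + 1 ≤ s + k →
    pvCollect l c1 c2 d s = (pvPos l [c1, c2] s).map (fun p => (p, d)) := by
  intro k
  induction k with
  | zero =>
    intro s h
    unfold pvCollect
    rw [dif_pos (pvFind_past l [c1, c2] s (by omega)), pvPos_eq_nil_of_ge l [c1, c2] s (by omega)]
    simp
  | succ k ih =>
    intro s h
    by_cases hf : PySem.Chars.findFrom l [c1, c2] (s : Int) none = -1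
    · unfold pvCollect
      rw [dif_pos hf]
      by_cases hs : s ≤ l.length
      · have hni := (PySem.Chars.findFrom_natCast_eq_neg_one_iff l [c1, c2] s hs).mp hf
        rw [pvPos_eq_nil l [c1, c2] (l.length + 1) s (by omega) ?_]
        · simp
        · intro j hj hmatch
          refine hni (pvPrefix_drop_infix _ _ (j - s) ?_)
          rw [List.drop_drop]
          have hjs : s + (j - s) = j := by omega
          rw [hjs]
          exact List.prefix_iff_eq_take.mpr (by simpa using hmatch.symm)
      · rw [pvPos_eq_nil_of_ge l [c1, c2] s (by omega)]
        simp
    · have hb := pvFind_bounds l c1 c2 s hf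
      have hs : s ≤ l.length := by omega
      obtain ⟨h1, h2, h3⟩ := PySem.Chars.findFrom_natCast_spec l [c1, c2] s hs hf
      set f := (PySem.Chars.findFrom l [c1, c2] (s : Int) none).toNat with hfdef
      have hmatch : (l.drop f).take 2 = [c1, c2] := by
        have := List.prefix_iff_eq_take.mp h2
        simpa using this.symm
      have hskip : pvPos l [c1, c2] s = pvPos l [c1, c2] f := by
        have hsk := pvPos_skip l [c1, c2] (f - s) s ?_
        · have hfs : s + (f - s) = f := by omega
          rwa [hfs] at hsk
        · intro j hj1 hj2 hmat
          exact h3 j (by exact_mod_cast hj1) (by omega)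
            (List.prefix_iff_eq_take.mpr (by simpa using hmat.symm))
      unfold pvCollect
      rw [dif_neg hf]
      rw [hskip]
      unfold pvPos
      rw [dif_pos hb.2, if_pos hmatch]
      rw [ih (f + 1) (by omega)]
      simp
      exact hfdef.symm

-- ---- B-side step 2: sorting the two collect lists gives pvEv ----
lemma pvEv_mem (l : List Char) : ∀ (k e : Nat), l.length ≤ e + k → ∀ (p : Nat) (d : Int),
    ((p, d) ∈ pvEv l e ↔ (e ≤ p ∧ p < l.length ∧ pvDelta l p ≠ 0 ∧ d = pvDelta l p)) := by
  intro k
  induction k with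
  | zero =>
    intro e h p d
    unfold pvEv
    rw [dif_neg (by omega)]
    simp
    omega
  | succ k ih =>
    intro e h p d
    by_cases he : e < l.length
    · unfold pvEv
      rw [dif_pos he, List.mem_append, ih (e + 1) (by omega) p d]
      constructor
      · rintro (hx | ⟨h1, h2, h3, h4⟩)
        · by_cases hd : pvDelta l e = 0
          · rw [if_pos hd] at hx; simp at hx
          · rw [if_neg hd] at hx
            simp at hx
            obtain ⟨hp, hdd⟩ := hx
            subst hp
            exact ⟨le_rfl, he, hd, hdd⟩
        · exact ⟨by omega, h2, h3, h4⟩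
      · rintro ⟨h1, h2, h3, h4⟩
        rcases Nat.eq_or_lt_of_le h1 with heq | hlt
        · left
          subst heq
          rw [if_neg h3]
          simp [h4]
        · right
          exact ⟨by omega, h2, h3, h4⟩
    · unfold pvEv
      rw [dif_neg he]
      simp
      omega

lemma pvEv_pairwise (l : List Char) : ∀ (k e : Nat), l.length ≤ e + k →
    (pvEv l e).Pairwise (fun a b => a.1 < b.1) := by
  intro k
  induction k with
  | zero =>
    intro e h
    unfold pvEv
    rw [dif_neg (by omega)]
    exact List.Pairwise.nil
  | succ k ih =>
    intro e h
    by_cases he : e < l.length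
    · unfold pvEv
      rw [dif_pos he]
      by_cases hd : pvDelta l e = 0
      · rw [if_pos hd]
        simpa using ih (e + 1) (by omega)
      · rw [if_neg hd]
        simp only [List.singleton_append, List.pairwise_cons]
        refine ⟨?_, ih (e + 1) (by omega)⟩
        rintro ⟨p, b⟩ hab
        have := (pvEv_mem l k (e + 1) (by omega) p b).mp hab
        simp only []
        omega
    · unfold pvEv
      rw [dif_neg he]
      exact List.Pairwise.nil

lemma pvPos_mem (l pat : List Char) : ∀ (k s : Nat), l.length ≤ s + k → ∀ p, p ∈ pvPos l pat s ↔
    (s ≤ p ∧ p < l.length ∧ (l.drop p).take 2 = pat) := by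
  intro k
  induction k with
  | zero =>
    intro s h p
    rw [pvPos_eq_nil_of_ge l pat s (by omega)]
    simp
    omega
  | succ k ih =>
    intro s h p
    by_cases hs : s < l.length
    · unfold pvPos
      rw [dif_pos hs, List.mem_append, ih (s + 1) (by omega) p]
      constructor
      · rintro (hx | ⟨h1, h2, h3⟩)
        · by_cases hm : (l.drop s).take 2 = pat
          · rw [if_pos hm] at hx
            simp at hx
            subst hx
            exact ⟨le_rfl, hs, hm⟩
          · rw [if_neg hm] at hx; simp at hx
        · exact ⟨by omega, h2, h3⟩
      · rintro ⟨h1, h2, h3⟩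
        rcases Nat.eq_or_lt_of_le h1 with heq | hlt
        · left
          subst heq
          rw [if_pos h3]
          simp
        · right
          exact ⟨by omega, h2, h3⟩
    · rw [pvPos_eq_nil_of_ge l pat s (by omega)]
      simp
      omega

lemma pvPos_pairwise (l pat : List Char) : ∀ (k s : Nat), l.length ≤ s + k →
    (pvPos l pat s).Pairwise (· < ·) := by
  intro k
  induction k with
  | zero =>
    intro s h
    rw [pvPos_eq_nil_of_ge l pat s (by omega)]
    exact List.Pairwise.nil
  | succ k ih =>
    intro s h
    by_cases hs : s < l.length
    · unfold pvPos
      rw [dif_pos hs]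
      by_cases hm : (l.drop s).take 2 = pat
      · rw [if_pos hm]
        simp only [List.singleton_append, List.pairwise_cons]
        refine ⟨?_, ih (s + 1) (by omega)⟩
        intro b hb
        have := (pvPos_mem l pat k (s + 1) (by omega) b).mp hb
        omega
      · rw [if_neg hm]
        simpa using ih (s + 1) (by omega)
    · rw [pvPos_eq_nil_of_ge l pat s (by omega)]
      exact List.Pairwise.nil

-- delta value ↔ which pattern matches
lemma pvDelta_one (l : List Char) (p : Nat) : pvDelta l p = 1 ↔ (l.drop p).take 2 = ['(', '*'] := by
  unfold pvDelta; split_ifs <;> simp_all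
lemma pvDelta_negone (l : List Char) (p : Nat) : pvDelta l p = -1 ↔ (l.drop p).take 2 = ['*', ')'] := by
  unfold pvDelta; split_ifs <;> simp_all

lemma pvSortedEvents (l : List Char) :
    PySem.List.sorted ((pvPos l ['(', '*'] 0).map (fun p => (p, (1 : Int))) ++
      (pvPos l ['*', ')'] 0).map (fun p => (p, (-1 : Int)))) (fun e => e.1) false = pvEv l 0 := by
  have hposA := pvPos_pairwise l ['(', '*'] l.length 0 (by omega)
  have hposB := pvPos_pairwise l ['*', ')'] l.length 0 (by omega)
  have hEvNd : (pvEv l 0).Nodup :=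
    (pvEv_pairwise l l.length 0 (by omega)).imp (fun h he => by subst he; omega)
  have hANd : ((pvPos l ['(', '*'] 0).map (fun p => (p, (1 : Int)))).Nodup :=
    List.Nodup.map (fun a b h => by simpa using h) (hposA.imp (fun h => Nat.ne_of_lt h))
  have hBNd : ((pvPos l ['*', ')'] 0).map (fun p => (p, (-1 : Int)))).Nodup :=
    List.Nodup.map (fun a b h => by simpa using h) (hposB.imp (fun h => Nat.ne_of_lt h))
  have hDisj : ((pvPos l ['(', '*'] 0).map (fun p => (p, (1 : Int)))).Disjoint
      ((pvPos l ['*', ')'] 0).map (fun p => (p, (-1 : Int)))) := by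
    rintro ⟨p, d⟩ h1 h2
    simp only [List.mem_map] at h1 h2
    obtain ⟨a, _, ha⟩ := h1
    obtain ⟨b, _, hb⟩ := h2
    rw [Prod.mk.injEq] at ha hb
    omega
  apply PySem.List.sorted_eq_of_perm_of_pairwise_lt
  · refine (List.perm_ext_iff_of_nodup hEvNd (List.Nodup.append hANd hBNd hDisj)).mpr ?_
    rintro ⟨p, d⟩
    rw [pvEv_mem l l.length 0 (by omega) p d, List.mem_append]
    simp only [List.mem_map, pvPos_mem l _ l.length 0 (by omega)]
    constructor
    · rintro ⟨h0, h1, h2, h3⟩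
      by_cases hm1 : (l.drop p).take 2 = ['(', '*']
      · left
        exact ⟨p, ⟨h0, h1, hm1⟩, by rw [h3, (pvDelta_one l p).mpr hm1]⟩
      · by_cases hm2 : (l.drop p).take 2 = ['*', ')']
        · right
          exact ⟨p, ⟨h0, h1, hm2⟩, by rw [h3, (pvDelta_negone l p).mpr hm2]⟩
        · exfalso
          apply h2
          unfold pvDelta
          rw [if_neg hm1, if_neg hm2]
    · rintro (⟨a, ⟨ha0, ha1, ha2⟩, heq⟩ | ⟨a, ⟨ha0, ha1, ha2⟩, heq⟩)
      · rw [Prod.mk.injEq] at heq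
        obtain ⟨rfl, rfl⟩ := heq
        have hd := (pvDelta_one l a).mpr ha2
        exact ⟨ha0, ha1, by omega, hd.symm⟩
      · rw [Prod.mk.injEq] at heq
        obtain ⟨rfl, rfl⟩ := heq
        have hd := (pvDelta_negone l a).mpr ha2
        exact ⟨ha0, ha1, by omega, hd.symm⟩
  · exact pvEv_pairwise l l.length 0 (by omega)

-- ---- B-side step 3: emitting runs computes the prefix sums ----
lemma pvAccum_zeros (depth : Int) (ds : List Int) : ∀ m,
    pvAccum depth (List.replicate m 0 ++ ds) = List.replicate m depth ++ pvAccum depth ds := by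
  intro m
  induction m with
  | zero => rfl
  | succ m ih => simp [List.replicate_succ, pvAccum, ih]

lemma pvDropRun (l : List Char) : ∀ (m prev : Nat), prev + m ≤ l.length →
    (∀ j, prev ≤ j → j < prev + m → pvDelta l j = 0) →
    ((List.range l.length).map (pvDelta l)).drop prev
      = List.replicate m 0 ++ ((List.range l.length).map (pvDelta l)).drop (prev + m) := by
  intro m
  induction m with
  | zero => intro prev _ _; simp
  | succ m ih =>
    intro prev h hz
    have hp : prev < l.length := by omega
    have hcons : ((List.range l.length).map (pvDelta l)).drop prev
        = pvDelta l prev :: ((List.range l.length).map (pvDelta l)).drop (prev + 1) := by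
      rw [List.drop_eq_getElem_cons (by simpa using hp)]
      simp
    rw [hcons, hz prev le_rfl (by omega), ih (prev + 1) (by omega) (fun j h1 h2 => hz j (by omega) (by omega))]
    have : prev + 1 + m = prev + (m + 1) := by omega
    rw [this, List.replicate_succ]
    simp

lemma pvEmitLem (l : List Char) : ∀ (k e prev : Nat) (depth : Int) (out : List String),
    prev ≤ e → e + k = l.length → (∀ j, prev ≤ j → j < e → pvDelta l j = 0) →
    pvEmit l.length (pvEv l e) depth prev out
      = out ++ (pvAccum depth (((List.range l.length).map (pvDelta l)).drop prev)).map PySem.Int.toStr := by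
  intro k
  induction k with
  | zero =>
    intro e prev depth out hpe he hz
    have heq : e = l.length := by omega
    subst heq
    have hev : pvEv l l.length = [] := by rw [pvEv_unfold]; simp
    rw [hev]
    rw [pvDropRun l (l.length - prev) prev (by omega) (fun j h1 h2 => hz j h1 (by omega))]
    have h1 : prev + (l.length - prev) = l.length := by omega
    rw [h1]
    have h2 : pvAccum depth (List.replicate (l.length - prev) 0)
        = List.replicate (l.length - prev) depth := by
      have h3 := pvAccum_zeros depth [] (l.length - prev)
      simpa [pvAccum] using h3
    simp [pvEmit, h2, List.drop_eq_nil_of_le]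
  | succ k ih =>
    intro e prev depth out hpe he hz
    have hel : e < l.length := by omega
    by_cases hd : pvDelta l e = 0
    · have hev : pvEv l e = pvEv l (e + 1) := by
        rw [pvEv_unfold l e, if_pos hel, if_pos hd, List.nil_append]
      rw [hev, ih (e + 1) prev depth out (by omega) (by omega) ?_]
      intro j h1 h2
      rcases Nat.lt_or_ge j e with h | h
      · exact hz j h1 h
      · have hje : j = e := by omega
        rw [hje]
        exact hd
    · have hev : pvEv l e = (e, pvDelta l e) :: pvEv l (e + 1) := by
        rw [pvEv_unfold l e, if_pos hel, if_neg hd, List.singleton_append]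
      rw [hev]
      unfold pvEmit
      rw [ih (e + 1) (e + 1) (depth + pvDelta l e) _ le_rfl (by omega) (by omega)]
      rw [pvDropRun l (e - prev) prev (by omega) (fun j h1 h2 => hz j h1 (by omega))]
      have h1 : prev + (e - prev) = e := by omega
      rw [h1]
      have hcons : ((List.range l.length).map (pvDelta l)).drop e
          = pvDelta l e :: ((List.range l.length).map (pvDelta l)).drop (e + 1) := by
        rw [List.drop_eq_getElem_cons (by simpa using hel)]
        simp
      rw [hcons, pvAccum_zeros]
      simp [pvAccum]

-- ===== VERDICT (by name: the statement is the Claim_ definition above) =====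
theorem mynestco_spec : Claim_equal_mynestco := by
  intro stri _
  unfold Spec_mynestco mynestco mynestco_alt
  dsimp only
  have hA := loopA stri.toList stri.toList.length 0 0 [] (by omega)
  have hC1 := pvCollect_eq stri.toList '(' '*' 1 (stri.toList.length + 1) 0 (by omega)
  have hC2 := pvCollect_eq stri.toList '*' ')' (-1) (stri.toList.length + 1) 0 (by omega)
  have hS := pvSortedEvents stri.toList
  have hE := pvEmitLem stri.toList stri.toList.length 0 0 0 [] (by omega) (by omega) (by omega)
  rw [hC1, hC2, hS, hE]
  rw [show ((0 : Nat) : Int) = (0 : Int) from rfl] at hA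
  exact hA
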